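-- pv_equiv track=rewrite | github.com/zzcleverest/Glean | server/service.py | collate_6
-- ===== SOURCE A (Python) =====
-- def collate_6(batch):
--     inp0 = [item[0] for item in batch]
--     inp1 = [item[1] for item in batch]
--     inp2 = [item[2] for item in batch]
--     inp3 = [item[3] for item in batch]
--     inp4 = [item[4] for item in batch]
--     inp5 = [item[5] for item in batch]
--     return [inp0, inp1, inp2, inp3, inp4, inp5]
-- ===== SOURCE B (Python) =====
-- def collate_6(batch):
--     cols = [[], [], [], [], [], []]
--     for item in batch:
--         for i in range(6):
--             cols[i].append(item[i])
--     return cols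
-- ===== Notes on version B (the rewrite author's own statement) =====
-- stated objective: alternative
-- what changed: Replaces A's six separate comprehension passes over batch with a single pass that maintains six accumulator lists and appends each tuple component as it goes.
import Mathlib
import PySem

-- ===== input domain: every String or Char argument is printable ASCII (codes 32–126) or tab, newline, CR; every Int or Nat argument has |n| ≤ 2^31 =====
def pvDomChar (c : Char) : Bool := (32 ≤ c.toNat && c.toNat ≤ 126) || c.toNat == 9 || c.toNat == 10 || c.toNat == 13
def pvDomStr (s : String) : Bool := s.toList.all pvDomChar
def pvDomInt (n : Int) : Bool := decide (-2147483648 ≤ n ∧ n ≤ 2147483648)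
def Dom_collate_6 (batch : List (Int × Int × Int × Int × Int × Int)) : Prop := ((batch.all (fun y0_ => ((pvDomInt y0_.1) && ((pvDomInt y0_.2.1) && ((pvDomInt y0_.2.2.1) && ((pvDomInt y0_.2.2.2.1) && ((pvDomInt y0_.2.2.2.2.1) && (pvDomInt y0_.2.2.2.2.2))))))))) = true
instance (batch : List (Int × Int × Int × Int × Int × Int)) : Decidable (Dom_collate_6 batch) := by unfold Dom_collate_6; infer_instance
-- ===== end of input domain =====

-- B replaces A's six separate passes over batch with one pass keeping six accumulator lists (alternative decomposition, same cost).

-- ===== PORT A =====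
-- A: six list comprehensions, each a separate pass projecting one component.
def collate_6 (batch : List (Int × Int × Int × Int × Int × Int)) : List (List Int) :=
  let inp0 := batch.map (fun item => item.1)
  let inp1 := batch.map (fun item => item.2.1)
  let inp2 := batch.map (fun item => item.2.2.1)
  let inp3 := batch.map (fun item => item.2.2.2.1)
  let inp4 := batch.map (fun item => item.2.2.2.2.1)
  let inp5 := batch.map (fun item => item.2.2.2.2.2)
  [inp0, inp1, inp2, inp3, inp4, inp5]

-- ===== PORT B =====
-- B: single fold over batch; the state is the six column accumulators, each append = cols[i].append(item[i]).
def collate_6_alt (batch : List (Int × Int × Int × Int × Int × Int)) : List (List Int) :=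
  let cols :=
    batch.foldl
      (fun (c : List Int × List Int × List Int × List Int × List Int × List Int) item =>
        (c.1 ++ [item.1], c.2.1 ++ [item.2.1], c.2.2.1 ++ [item.2.2.1],
         c.2.2.2.1 ++ [item.2.2.2.1], c.2.2.2.2.1 ++ [item.2.2.2.2.1],
         c.2.2.2.2.2 ++ [item.2.2.2.2.2]))
      ([], [], [], [], [], [])
  [cols.1, cols.2.1, cols.2.2.1, cols.2.2.2.1, cols.2.2.2.2.1, cols.2.2.2.2.2]

-- ===== PRECONDITION & SPEC =====
def Spec_collate_6 (batch : List (Int × Int × Int × Int × Int × Int)) (out : List (List Int)) : Prop := out = collate_6_alt batch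
instance (batch : List (Int × Int × Int × Int × Int × Int)) (out : List (List Int)) : Decidable (Spec_collate_6 batch out) := by unfold Spec_collate_6; infer_instance

-- ===== CLAIM (what is proved, stated in full; the proofs are below) =====
def Claim_equal_collate_6 : Prop := ∀ (batch : List (Int × Int × Int × Int × Int × Int)), Dom_collate_6 batch → Spec_collate_6 batch (collate_6 batch)

-- ===== LEMMAS AND PROOFS =====

-- Invariant of B's fold: starting from accumulators (a0,…,a5) it appends the componentwise maps.
theorem collate_6_fold_inv (batch : List (Int × Int × Int × Int × Int × Int))
    (acc : List Int × List Int × List Int × List Int × List Int × List Int) :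
    batch.foldl
      (fun (c : List Int × List Int × List Int × List Int × List Int × List Int) item =>
        (c.1 ++ [item.1], c.2.1 ++ [item.2.1], c.2.2.1 ++ [item.2.2.1],
         c.2.2.2.1 ++ [item.2.2.2.1], c.2.2.2.2.1 ++ [item.2.2.2.2.1],
         c.2.2.2.2.2 ++ [item.2.2.2.2.2])) acc
    = (acc.1 ++ batch.map (fun item => item.1),
       acc.2.1 ++ batch.map (fun item => item.2.1),
       acc.2.2.1 ++ batch.map (fun item => item.2.2.1),
       acc.2.2.2.1 ++ batch.map (fun item => item.2.2.2.1),
       acc.2.2.2.2.1 ++ batch.map (fun item => item.2.2.2.2.1),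
       acc.2.2.2.2.2 ++ batch.map (fun item => item.2.2.2.2.2)) := by
  induction batch generalizing acc with
  | nil => simp
  | cons h t ih => simp [List.foldl, ih]

-- ===== VERDICT (by name: the statement is the Claim_ definition above) =====
theorem collate_6_spec : Claim_equal_collate_6 := by
  intro batch _
  unfold Spec_collate_6 collate_6 collate_6_alt
  simp [collate_6_fold_inv]
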